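-- pv_equiv track=rewrite | github.com/javadmaaref/PriceStockUpdater | data/data_processor.py | find_least_price_with_stock
-- ===== SOURCE A (Python) =====
-- def find_least_price_with_stock(prices, stocks):
--     least_price = None
--     least_stock = None
--     for price, stock in zip(prices, stocks):
--         if stock > 0:
--             if least_price is None or price < least_price:
--                 least_price = price
--                 least_stock = stock
--     if least_stock is None:
--         if prices[1] == 0 and stocks[1] == 0:  # If Price2 is 0 and Stock2 is 0
--             least_price = prices[0]
--             least_stock = stocks[0]
--         else:
--             least_price = min(prices)  # Select the minimum price among available options
--             least_stock = max(stocks)  # Select the maximum stock among available options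
--     return least_price, least_stock
-- ===== SOURCE B (Python) =====
-- def find_least_price_with_stock(prices, stocks):
--     pairs = [(p, s) for p, s in zip(prices, stocks) if s > 0]
--     if pairs:
--         least_price = min(p for p, _ in pairs)
--         least_stock = next(s for p, s in pairs if p == least_price)
--         return least_price, least_stock
--     if prices[1] == 0 and stocks[1] == 0:
--         return prices[0], stocks[0]
--     return min(prices), max(stocks)
-- ===== Notes on version B (the rewrite author's own statement) =====
-- stated objective: alternative
-- what changed: Replaces A's single running-minimum accumulator loop by a filter-then-reduce pipeline: build the in-stock pairs once, take the minimum price over them, then locate the first pair carrying that price; the fallback branch for no in-stock item is the same as A's.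
import Mathlib
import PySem

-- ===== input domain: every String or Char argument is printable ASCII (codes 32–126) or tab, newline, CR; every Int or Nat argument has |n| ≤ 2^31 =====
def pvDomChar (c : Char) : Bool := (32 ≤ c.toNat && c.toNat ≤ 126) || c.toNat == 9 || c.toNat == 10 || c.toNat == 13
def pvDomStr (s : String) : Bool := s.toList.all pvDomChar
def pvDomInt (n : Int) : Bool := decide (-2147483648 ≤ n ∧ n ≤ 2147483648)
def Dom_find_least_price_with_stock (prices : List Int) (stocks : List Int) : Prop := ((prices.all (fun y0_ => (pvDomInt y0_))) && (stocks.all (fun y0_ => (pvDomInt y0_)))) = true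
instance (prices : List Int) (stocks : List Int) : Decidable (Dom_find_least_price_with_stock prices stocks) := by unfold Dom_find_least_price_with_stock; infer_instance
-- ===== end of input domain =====

-- B replaces A's single running-minimum accumulator loop by a filter-then-reduce pipeline
-- (build the in-stock pairs, take the minimum price, find the first pair carrying it);
-- objective: alternative (same O(n) cost, different decomposition).

-- ===== PORT A =====
-- the loop body of A's for-loop (running keep-first minimum over in-stock pairs)
def pvStepA (st : Option (Int × Int)) (ps : Int × Int) : Option (Int × Int) :=
  if ps.2 > 0 then
    match st with
    | none => some ps
    | some q => if ps.1 < q.1 then some ps else some q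
  else st

def find_least_price_with_stock (prices : List Int) (stocks : List Int) : Int × Int :=
  match (List.zip prices stocks).foldl pvStepA none with
  | some r => r
  | none =>
    if PySem.List.pyGetD prices 1 0 = 0 ∧ PySem.List.pyGetD stocks 1 0 = 0 then
      (PySem.List.pyGetD prices 0 0, PySem.List.pyGetD stocks 0 0)
    else
      ((PySem.List.min? prices (fun y => y)).getD 0,
       (PySem.List.max? stocks (fun y => y)).getD 0)

-- ===== PORT B =====
def find_least_price_with_stock_alt (prices : List Int) (stocks : List Int) : Int × Int :=
  match (List.zip prices stocks).filter (fun ps => ps.2 > 0) with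
  | [] =>
    if PySem.List.pyGetD prices 1 0 = 0 ∧ PySem.List.pyGetD stocks 1 0 = 0 then
      (PySem.List.pyGetD prices 0 0, PySem.List.pyGetD stocks 0 0)
    else
      ((PySem.List.min? prices (fun y => y)).getD 0,
       (PySem.List.max? stocks (fun y => y)).getD 0)
  | a :: l =>
    let m := (PySem.List.min? ((a :: l).map (fun ps => ps.1)) (fun y => y)).getD 0
    match (a :: l).find? (fun ps => ps.1 == m) with
    | some r => (m, r.2)
    | none => (0, 0)  -- unreachable: the minimum is attained by some pair

-- ===== PRECONDITION & SPEC =====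
-- Pre_ excludes exactly the inputs where A raises: no in-stock pair and either prices[1]
-- is missing, or the first fallback test passes prices[1]==0 but stocks[1] is missing,
-- or it fails and stocks is empty (max of empty).
def Pre_find_least_price_with_stock (prices : List Int) (stocks : List Int) : Prop :=
  (∃ ps ∈ List.zip prices stocks, ps.2 > 0) ∨
    (2 ≤ prices.length ∧
      ((PySem.List.pyGet? prices 1 = some 0 ∧ 2 ≤ stocks.length) ∨
       (PySem.List.pyGet? prices 1 ≠ some 0 ∧ stocks ≠ [])))
instance (prices : List Int) (stocks : List Int) : Decidable (Pre_find_least_price_with_stock prices stocks) := by unfold Pre_find_least_price_with_stock; infer_instance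

def pvWitness_find_least_price_with_stock : List Int × List Int := ([3, 1, 2], [0, 5, 5])

def Spec_find_least_price_with_stock (prices : List Int) (stocks : List Int) (out : Int × Int) : Prop := out = find_least_price_with_stock_alt prices stocks
instance (prices : List Int) (stocks : List Int) (out : Int × Int) : Decidable (Spec_find_least_price_with_stock prices stocks out) := by unfold Spec_find_least_price_with_stock; infer_instance

-- ===== CLAIM (what is proved, stated in full; the proofs are below) =====
def Claim_equal_find_least_price_with_stock : Prop := ∀ (prices : List Int) (stocks : List Int), Dom_find_least_price_with_stock prices stocks → Pre_find_least_price_with_stock prices stocks → Spec_find_least_price_with_stock prices stocks (find_least_price_with_stock prices stocks)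

-- ===== LEMMAS AND PROOFS =====

-- total running keep-first minimum (the state of A's loop once it is some _)
def pvG (q : Int × Int) (ps : Int × Int) : Int × Int := if ps.1 < q.1 then ps else q

theorem pvStepA_filter (l : List (Int × Int)) (st : Option (Int × Int)) :
    l.foldl pvStepA st = (l.filter (fun ps => ps.2 > 0)).foldl pvStepA st := by
  induction l generalizing st with
  | nil => rfl
  | cons a l ih =>
    by_cases h : a.2 > 0 <;> simp [h, List.foldl_cons, pvStepA, ih]

theorem pvStepA_some (l : List (Int × Int)) (q : Int × Int)
    (h : ∀ p ∈ l, p.2 > 0) :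
    l.foldl pvStepA (some q) = some (l.foldl pvG q) := by
  induction l generalizing q with
  | nil => rfl
  | cons a l ih =>
    have ha : a.2 > 0 := h a (List.mem_cons_self ..)
    simp only [List.foldl_cons, pvStepA, if_pos ha, pvG]
    split <;> exact ih _ (fun p hp => h p (List.mem_cons_of_mem _ hp))

theorem pvG_fst (l : List (Int × Int)) (q : Int × Int) :
    (l.foldl pvG q).1 = (l.map (fun ps => ps.1)).foldl min q.1 := by
  induction l generalizing q with
  | nil => rfl
  | cons a l ih =>
    simp only [List.foldl_cons, List.map_cons, ih, pvG]
    congr 1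
    split <;> omega

theorem pvG_le (l : List (Int × Int)) (q : Int × Int) :
    (l.foldl pvG q).1 ≤ q.1 := by
  induction l generalizing q with
  | nil => exact le_refl _
  | cons a l ih =>
    simp only [List.foldl_cons, pvG]
    split
    · exact le_trans (ih (a)) (by omega)
    · exact ih q

theorem pvFind_fold (l : List (Int × Int)) (q : Int × Int) :
    (q :: l).find? (fun p => p.1 == (l.foldl pvG q).1) = some (l.foldl pvG q) := by
  induction l generalizing q with
  | nil => simp [List.find?]
  | cons a l ih =>
    have hle : (l.foldl pvG (pvG q a)).1 ≤ (pvG q a).1 := pvG_le l (pvG q a)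
    by_cases hab : a.1 < q.1
    · -- pvG q a = a; head q cannot match (its price is strictly larger)
      have hg : pvG q a = a := by simp [pvG, hab]
      rw [hg] at hle
      have iha := ih a
      simp only [List.foldl_cons, hg]
      rw [List.find?_cons_of_neg (by simp; omega)]
      exact iha
    · have hg : pvG q a = q := by simp [pvG, hab]
      have ihq := ih q
      simp only [List.foldl_cons, hg]
      rw [hg] at hle
      by_cases hqm : q.1 = (l.foldl pvG q).1
      · have hq_eq : q = l.foldl pvG q := by
          rw [List.find?_cons_of_pos (by simpa using hqm)] at ihq
          exact Option.some_inj.mp ihq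
        rw [List.find?_cons_of_pos (by simpa using hqm)]
        exact congrArg some hq_eq
      · have hlt : (l.foldl pvG q).1 < q.1 := lt_of_le_of_ne hle (fun h => hqm h.symm)
        rw [List.find?_cons_of_neg (by simp; omega),
            List.find?_cons_of_neg (by simp; omega)]
        rw [List.find?_cons_of_neg (by simp; omega)] at ihq
        exact ihq

theorem find_least_price_with_stock_spec : Claim_equal_find_least_price_with_stock := by
  intro prices stocks _ _
  unfold Spec_find_least_price_with_stock
  unfold find_least_price_with_stock find_least_price_with_stock_alt
  rw [pvStepA_filter]
  cases hf : (List.zip prices stocks).filter (fun ps => ps.2 > 0) with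
  | nil => rfl
  | cons a l =>
    have hpos : ∀ p ∈ a :: l, p.2 > 0 := by
      intro p hp
      have := List.of_mem_filter (hf ▸ hp)
      simpa using this
    have ha : a.2 > 0 := hpos a (List.mem_cons_self ..)
    have h1 : (a :: l).foldl pvStepA none = some (l.foldl pvG a) := by
      simp only [List.foldl_cons, pvStepA, if_pos ha]
      exact pvStepA_some l a (fun p hp => hpos p (List.mem_cons_of_mem _ hp))
    rw [h1]
    have hm : (PySem.List.min? ((a :: l).map (fun ps => ps.1)) (fun y => y)).getD 0
        = (l.foldl pvG a).1 := by
      rw [List.map_cons, PySem.List.min?_id_cons]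
      simp [pvG_fst]
    simp only [hm, pvFind_fold]
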